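-- pv_equiv track=rewrite | github.com/ScrappinR/MWRASP-Quantum-Defense | MWRASP_REVOLUTIONARY_PROTOCOL_ORDER_AUTH.py | _apply_interleaving
-- ===== SOURCE A (Python) =====
-- from typing import Dict, List, Optional, Tuple, Any, Set
--
-- def _apply_interleaving(order: List[str], pattern: List[int]) -> List[str]:
--     """Apply interleaving pattern to protocol order"""
--     if not pattern or len(order) < 3:
--         return order
--
--     interleaved = []
--     remaining = order.copy()
--
--     for i, p in enumerate(pattern):
--         if remaining and i < len(remaining):
--             if p == 0:  # Take from front
--                 interleaved.append(remaining.pop(0))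
--             elif p == 1:  # Take from back
--                 interleaved.append(remaining.pop(-1))
--             else:  # Take from middle
--                 mid_idx = len(remaining) // 2
--                 if mid_idx < len(remaining):
--                     interleaved.append(remaining.pop(mid_idx))
--
--     # Add remaining protocols
--     interleaved.extend(remaining)
--
--     return interleaved
-- ===== SOURCE B (Python) =====
-- from collections import deque
-- from typing import List
--
-- def _apply_interleaving(order: List[str], pattern: List[int]) -> List[str]:
--     """Two-deque (balanced halves) re-implementation: O(n + len(pattern)) total.
--
--     A's loop stops popping as soon as i >= len(remaining); since len(remaining)
--     shrinks by one per pop, exactly k = min(len(pattern), ceil(n/2)) picks happen.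
--     The remaining list is kept as two halves: `left` holds the first m//2 elements
--     and `right` the rest, so front = left[0], back = right[-1], middle = right[0],
--     each removable in O(1) with O(1) rebalancing.
--     """
--     n = len(order)
--     if not pattern or n < 3:
--         return order
--
--     k = min(len(pattern), (n + 1) // 2)
--     left = deque(order[:n // 2])
--     right = deque(order[n // 2:])
--     out = []
--     for p in pattern[:k]:
--         m = len(left) + len(right)
--         if p == 0:
--             out.append(left.popleft())
--             if m % 2 == 1:          # left one short of (m-1)//2
--                 left.append(right.popleft())
--         elif p == 1:
--             out.append(right.pop())
--             if m % 2 == 0:          # left one over (m-1)//2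
--                 right.appendleft(left.pop())
--         else:
--             out.append(right.popleft())
--             if m % 2 == 0:
--                 right.appendleft(left.pop())
--     out.extend(left)
--     out.extend(right)
--     return out
-- ===== Notes on version B (the rewrite author's own statement) =====
-- stated objective: faster
-- what changed: Replaces the list with O(n) pops at front/middle by two balanced deques (first half / second half of the remaining elements), so front, back and middle picks plus rebalancing are all O(1), and the loop runs only the k = min(len(pattern), ceil(n/2)) iterations on which A actually pops.
import Mathlib
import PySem

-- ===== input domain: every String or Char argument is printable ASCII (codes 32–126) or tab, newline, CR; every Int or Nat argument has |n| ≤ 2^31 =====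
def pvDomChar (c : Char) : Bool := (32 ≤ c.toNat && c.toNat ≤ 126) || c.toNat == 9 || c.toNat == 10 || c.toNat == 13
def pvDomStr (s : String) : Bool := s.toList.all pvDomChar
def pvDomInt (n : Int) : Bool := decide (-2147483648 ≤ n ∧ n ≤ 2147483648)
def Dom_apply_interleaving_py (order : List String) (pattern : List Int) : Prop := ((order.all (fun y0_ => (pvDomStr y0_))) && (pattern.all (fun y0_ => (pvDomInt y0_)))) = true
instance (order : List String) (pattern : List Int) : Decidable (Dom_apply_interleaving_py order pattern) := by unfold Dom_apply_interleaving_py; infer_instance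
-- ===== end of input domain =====

-- B replaces A's O(n) list pops by two balanced half-deques with O(1) picks and
-- runs only the iterations on which A actually pops (objective: faster).

-- ===== PORT A =====
-- loop body of A: state = (interleaved, remaining), item = (i, p) from enumerate
def stepA (st : List String × List String) (ip : Int × Int) : List String × List String :=
  if st.2 ≠ [] ∧ ip.1 < (st.2.length : Int) then
    if ip.2 = 0 then
      match PySem.List.pop? st.2 0 with
      | some r => (st.1 ++ [r.1], r.2)
      | none => st
    else if ip.2 = 1 then
      match PySem.List.pop? st.2 (-1) with
      | some r => (st.1 ++ [r.1], r.2)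
      | none => st
    else
      let mid : Int := PySem.Int.floordiv (st.2.length : Int) 2
      if mid < (st.2.length : Int) then
        match PySem.List.pop? st.2 mid with
        | some r => (st.1 ++ [r.1], r.2)
        | none => st
      else st
  else st

def apply_interleaving_py (order : List String) (pattern : List Int) : List String :=
  if pattern = [] ∨ order.length < 3 then order
  else
    ((PySem.List.enumerate pattern 0).foldl stepA ([], order)).1 ++
      ((PySem.List.enumerate pattern 0).foldl stepA ([], order)).2

-- ===== PORT B =====
-- loop body of B: state = (out, left, right); deque ops are head/cons/getLast?/dropLast
def stepB (st : List String × List String × List String) (p : Int) : List String × List String × List String :=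
  let m := st.2.1.length + st.2.2.length
  if p = 0 then
    match st.2.1 with
    | [] => st  -- deque.popleft on empty raises; unreachable as B uses it
    | x :: l' =>
      if m % 2 = 1 then
        match st.2.2 with
        | [] => (st.1 ++ [x], l', st.2.2)
        | y :: r' => (st.1 ++ [x], l' ++ [y], r')
      else (st.1 ++ [x], l', st.2.2)
  else if p = 1 then
    match st.2.2.getLast? with
    | none => st
    | some y =>
      if m % 2 = 0 then
        match st.2.1.getLast? with
        | none => (st.1 ++ [y], st.2.1, st.2.2.dropLast)
        | some z => (st.1 ++ [y], st.2.1.dropLast, z :: st.2.2.dropLast)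
      else (st.1 ++ [y], st.2.1, st.2.2.dropLast)
  else
    match st.2.2 with
    | [] => st
    | y :: r' =>
      if m % 2 = 0 then
        match st.2.1.getLast? with
        | none => (st.1 ++ [y], st.2.1, r')
        | some z => (st.1 ++ [y], st.2.1.dropLast, z :: r')
      else (st.1 ++ [y], st.2.1, r')

def apply_interleaving_py_alt (order : List String) (pattern : List Int) : List String :=
  if pattern = [] ∨ order.length < 3 then order
  else
    let k := min pattern.length ((order.length + 1) / 2)
    let s := (pattern.take k).foldl stepB
      ([], order.take (order.length / 2), order.drop (order.length / 2))
    s.1 ++ s.2.1 ++ s.2.2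

-- ===== PRECONDITION & SPEC =====
def Spec_apply_interleaving_py (order : List String) (pattern : List Int) (out : List String) : Prop := out = apply_interleaving_py_alt order pattern
instance (order : List String) (pattern : List Int) (out : List String) : Decidable (Spec_apply_interleaving_py order pattern out) := by unfold Spec_apply_interleaving_py; infer_instance

-- ===== CLAIM (what is proved, stated in full; the proofs are below) =====
def Claim_equal_apply_interleaving_py : Prop := ∀ (order : List String) (pattern : List Int), Dom_apply_interleaving_py order pattern → Spec_apply_interleaving_py order pattern (apply_interleaving_py order pattern)

-- ===== LEMMAS AND PROOFS =====

lemma eraseIdx_append_left_length (l r : List String) :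
    (l ++ r).eraseIdx l.length = l ++ r.tail := by
  induction l with
  | nil => simp
  | cons a l ih => simp [List.eraseIdx, ih]

lemma step_corr (i p : Int) (acc left right : List String)
    (hbal : left.length = (left.length + right.length) / 2)
    (hm2 : 2 ≤ left.length + right.length)
    (hi : i < ((left.length + right.length : Nat) : Int)) :
    ∃ x left' right',
      stepA (acc, left ++ right) (i, p) = (acc ++ [x], left' ++ right') ∧
      stepB (acc, left, right) p = (acc ++ [x], left', right') ∧
      left'.length + right'.length + 1 = left.length + right.length ∧
      left'.length = (left'.length + right'.length) / 2 := by
  have hL1 : 1 ≤ left.length := by omega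
  have hR1 : 1 ≤ right.length := by omega
  have hguard : (left ++ right ≠ [] ∧ i < ((left ++ right).length : Int)) := by
    constructor
    · intro hnil
      have h0 : (left ++ right).length = 0 := by rw [hnil]; rfl
      simp only [List.length_append] at h0; omega
    · simp only [List.length_append]; exact_mod_cast hi
  by_cases hp0 : p = 0
  · subst hp0
    cases left with
    | nil => simp at hL1
    | cons x l' =>
      have hg : x :: (l' ++ right) ≠ [] ∧ i < (((x :: (l' ++ right)).length : Nat) : Int) := by
        refine ⟨by simp, ?_⟩
        simp only [List.length_cons, List.length_append]
        simp only [List.length_cons] at hi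
        push_cast at hi ⊢; omega
      have hA0 : stepA (acc, (x :: l') ++ right) (i, 0) = (acc ++ [x], l' ++ right) := by
        show stepA (acc, x :: (l' ++ right)) (i, 0) = _
        simp only [stepA]
        rw [if_pos hg]
        norm_num [PySem.List.pop?_zero_cons]
      by_cases hpar : ((x :: l').length + right.length) % 2 = 1
      · cases right with
        | nil => simp at hR1
        | cons y r' =>
          refine ⟨x, l' ++ [y], r', ?_, ?_, ?_, ?_⟩
          · rw [hA0]; simp
          · simp [stepB] <;> simp only [List.length_cons, List.length_append, List.length_singleton, List.length_nil] at hpar ⊢ <;> omega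
          · simp only [List.length_cons, List.length_append, List.length_nil,
              List.length_singleton] at *; omega
          · simp only [List.length_cons, List.length_append, List.length_nil,
              List.length_singleton] at *; omega
      · refine ⟨x, l', right, hA0, ?_, ?_, ?_⟩
        · simp [stepB]
          intro hc; exfalso; simp only [List.length_cons] at hpar; omega
        · simp only [List.length_cons] at *; omega
        · simp only [List.length_cons] at *; omega
  · by_cases hp1 : p = 1
    · subst hp1
      rcases List.eq_nil_or_concat right with hnil | ⟨r0, y, hr⟩
      · subst hnil; simp at hR1
      · rw [List.concat_eq_append] at hr; subst hr
        have hpop : PySem.List.pop? (left ++ (r0 ++ [y])) (-1) = some (y, left ++ r0) := by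
          rw [← List.append_assoc]; exact PySem.List.pop?_last _ _
        have hA1 : stepA (acc, left ++ (r0 ++ [y])) (i, 1) = (acc ++ [y], left ++ r0) := by
          simp only [stepA]
          rw [if_pos hguard]
          norm_num [hpop]
        by_cases hpar : (left.length + (r0 ++ [y]).length) % 2 = 0
        · rcases List.eq_nil_or_concat left with hnil | ⟨l0, z, hl⟩
          · subst hnil; simp at hL1
          · rw [List.concat_eq_append] at hl; subst hl
            refine ⟨y, l0, z :: r0, ?_, ?_, ?_, ?_⟩
            · rw [hA1]; simp
            · simp [stepB, List.getLast?_concat, List.dropLast_concat] <;> simp only [List.length_cons, List.length_append, List.length_singleton, List.length_nil] at hpar ⊢ <;> omega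
            · simp only [List.length_cons, List.length_append, List.length_nil,
                List.length_singleton] at *; omega
            · simp only [List.length_cons, List.length_append, List.length_nil,
                List.length_singleton] at *; omega
        · refine ⟨y, left, r0, hA1, ?_, ?_, ?_⟩
          · simp [stepB, List.getLast?_concat, List.dropLast_concat]
            intro hc; exfalso
            simp only [List.length_append, List.length_singleton, List.length_cons,
              List.length_nil] at hpar hc; omega
          · simp only [List.length_append, List.length_singleton] at *; omega
          · simp only [List.length_append, List.length_singleton] at *; omega
    · cases right with
      | nil => simp at hR1
      | cons y r' =>
        have hmidlt : (left ++ y :: r').length / 2 < (left ++ y :: r').length := by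
          simp only [List.length_append, List.length_cons]; omega
        have hidx : (left ++ y :: r').length / 2 = left.length := by
          simp only [List.length_append, List.length_cons] at *; omega
        have hfd : PySem.Int.floordiv (((left ++ y :: r').length : Nat) : Int) 2
            = (((left ++ y :: r').length / 2 : Nat) : Int) := by
          exact_mod_cast PySem.Int.floordiv_natCast (left ++ y :: r').length 2
        have hlt' : (((left ++ y :: r').length / 2 : Nat) : Int)
            < (((left ++ y :: r').length : Nat) : Int) := by exact_mod_cast hmidlt
        have hget : (left ++ y :: r')[(left ++ y :: r').length / 2]'hmidlt = y := by
          rw [List.getElem_eq_iff, hidx]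
          simp [List.getElem?_append_right]
        have herase : (left ++ y :: r').eraseIdx ((left ++ y :: r').length / 2)
            = left ++ r' := by
          rw [hidx, eraseIdx_append_left_length]; rfl
        have hpop : PySem.List.pop? (left ++ y :: r')
            ((((left ++ y :: r').length / 2 : Nat) : Int)) = some (y, left ++ r') := by
          rw [PySem.List.pop?_natCast _ _ hmidlt, hget, herase]
        have hAm : stepA (acc, left ++ y :: r') (i, p) = (acc ++ [y], left ++ r') := by
          simp only [stepA]
          rw [if_pos hguard, if_neg hp0, if_neg hp1, hfd, if_pos hlt', hpop]
        by_cases hpar : (left.length + (y :: r').length) % 2 = 0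
        · rcases List.eq_nil_or_concat left with hnil | ⟨l0, z, hl⟩
          · subst hnil; simp at hL1
          · rw [List.concat_eq_append] at hl; subst hl
            refine ⟨y, l0, z :: r', ?_, ?_, ?_, ?_⟩
            · rw [hAm]; simp
            · simp [stepB, hp0, hp1, List.getLast?_concat, List.dropLast_concat] <;> simp only [List.length_cons, List.length_append, List.length_singleton, List.length_nil] at hpar ⊢ <;> omega
            · simp only [List.length_cons, List.length_append, List.length_nil,
                List.length_singleton] at *; omega
            · simp only [List.length_cons, List.length_append, List.length_nil,
                List.length_singleton] at *; omega
        · refine ⟨y, left, r', hAm, ?_, ?_, ?_⟩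
          · simp [stepB, hp0, hp1]
            intro hc; exfalso
            simp only [List.length_append, List.length_singleton, List.length_cons,
              List.length_nil] at hpar hc; omega
          · simp only [List.length_cons] at *; omega
          · simp only [List.length_cons] at *; omega

-- once the index has reached the length of `remaining`, A's loop does nothing
lemma frozen (pat : List Int) : ∀ (i : Int) (acc rem : List String),
    (rem.length : Int) ≤ i →
    (PySem.List.enumerate pat i).foldl stepA (acc, rem) = (acc, rem) := by
  induction pat with
  | nil => intro i acc rem _; simp [PySem.List.enumerate]
  | cons p ps ih =>
    intro i acc rem h
    rw [PySem.List.enumerate_cons]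
    have hstep : stepA (acc, rem) (i, p) = (acc, rem) := by
      simp only [stepA]
      rw [if_neg (by push_neg; intro _; omega)]
    rw [List.foldl_cons, hstep]
    exact ih (i + 1) acc rem (by omega)

-- main invariant: A's guarded fold over enumerate equals B's fold over the first
-- min(len(pat), ⌈(m-i)/2⌉) pattern entries on the balanced two-deque state
lemma loop_eq (pat : List Int) : ∀ (i : Nat) (acc left right : List String),
    left.length = (left.length + right.length) / 2 →
    (i < left.length + right.length → 2 ≤ left.length + right.length) →
    (PySem.List.enumerate pat (i : Int)).foldl stepA (acc, left ++ right) =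
      (fun st : List String × List String × List String => (st.1, st.2.1 ++ st.2.2))
        ((pat.take (min pat.length ((left.length + right.length - i + 1) / 2))).foldl stepB
          (acc, left, right)) := by
  induction pat with
  | nil => intro i acc left right _ _; simp [PySem.List.enumerate]
  | cons p ps ih =>
    intro i acc left right hbal hguard
    rw [PySem.List.enumerate_cons]
    by_cases hi : i < left.length + right.length
    · -- active iteration
      have hm2 : 2 ≤ left.length + right.length := hguard hi
      obtain ⟨x, left', right', hA, hB, hlen, hbal'⟩ :=
        step_corr (i : Int) p acc left right hbal hm2 (by exact_mod_cast hi)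
      have hcast : ((i : Int) + 1) = ((i + 1 : Nat) : Int) := by push_cast; ring
      have htake : (p :: ps).take (min (p :: ps).length
            ((left.length + right.length - i + 1) / 2)) =
          p :: ps.take (min ps.length
            ((left'.length + right'.length - (i + 1) + 1) / 2)) := by
        have h1 : min (p :: ps).length ((left.length + right.length - i + 1) / 2)
            = min ps.length ((left'.length + right'.length - (i + 1) + 1) / 2) + 1 := by
          simp only [List.length_cons]; omega
        rw [h1, List.take_succ_cons]
      rw [List.foldl_cons, hA, hcast, htake, List.foldl_cons, hB]
      exact ih (i + 1) (acc ++ [x]) left' right' hbal' (by omega)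
    · -- inactive from here on: A freezes, B takes nothing
      have hk : min (p :: ps).length ((left.length + right.length - i + 1) / 2) = 0 := by
        simp only [List.length_cons]; omega
      rw [hk, List.take_zero, List.foldl_nil]
      have hstep : stepA (acc, left ++ right) ((i : Int), p) = (acc, left ++ right) := by
        simp only [stepA]
        rw [if_neg (by push_neg; intro _; simp only [List.length_append]; push_cast; omega)]
      rw [List.foldl_cons, hstep]
      exact frozen ps ((i : Int) + 1) acc (left ++ right)
        (by simp only [List.length_append]; push_cast; omega)

-- ===== VERDICT (by name: the statement is the Claim_ definition above) =====
theorem apply_interleaving_py_spec : Claim_equal_apply_interleaving_py := by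
  intro order pattern _
  unfold Spec_apply_interleaving_py apply_interleaving_py apply_interleaving_py_alt
  by_cases h : pattern = [] ∨ order.length < 3
  · simp [h]
  · rw [if_neg h, if_neg h]
    push_neg at h
    have h3 : 3 ≤ order.length := by omega
    have hlt : (order.take (order.length / 2)).length = order.length / 2 := by
      simp; omega
    have hld : (order.drop (order.length / 2)).length = order.length - order.length / 2 := by
      simp
    have key := loop_eq pattern 0 [] (order.take (order.length / 2))
      (order.drop (order.length / 2))
      (by rw [hlt, hld]; omega)
      (by intro _; rw [hlt, hld]; omega)
    rw [List.take_append_drop] at key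
    have hcount : min pattern.length
        (((order.take (order.length / 2)).length + (order.drop (order.length / 2)).length
          - 0 + 1) / 2) = min pattern.length ((order.length + 1) / 2) := by
      rw [hlt, hld]; congr 1; omega
    rw [hcount] at key
    simp only [Nat.cast_zero] at key
    rw [key]
    simp [List.append_assoc]
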